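-- pv_equiv track=rewrite | github.com/dawson-teu/Competitive_Programming_Solutions | Advent_of_Code/2020/Day_4_Passport_Processing.py | check_passport_1
-- ===== SOURCE A (Python) =====
-- def split_fields(passport):
--     output = []
--     for word in passport.split(":"):
--         if " " in word:
--             output += word.split(" ")
--         else:
--             output.append(word)
--     return output
--
-- def check_passport_1(passport):
--     fields = split_fields(passport)
--     needed_fields = ["byr", "iyr", "eyr", "hgt", "hcl", "ecl", "pid"]
--
--     is_valid = True
--     for field in needed_fields:
--         if field not in fields:
--             is_valid = False
--             break
--     return is_valid
-- ===== SOURCE B (Python) =====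
-- def check_passport_1(passport):
--     needed_fields = ["byr", "iyr", "eyr", "hgt", "hcl", "ecl", "pid"]
--     found = [False] * 7
--     token = ""
--     for ch in passport + ":":
--         if ch in ": ":
--             if token in needed_fields:
--                 found[needed_fields.index(token)] = True
--             token = ""
--         else:
--             token += ch
--     return all(found)
-- ===== Notes on version B (the rewrite author's own statement) =====
-- stated objective: alternative
-- what changed: B makes a single left-to-right character scan of the passport string (no split calls and no per-required-field membership loop): it accumulates the current token, flushes it at every ':' or ' ' into a per-required-field boolean flag array via one index lookup, and returns the conjunction of the flags.
import Mathlib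
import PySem

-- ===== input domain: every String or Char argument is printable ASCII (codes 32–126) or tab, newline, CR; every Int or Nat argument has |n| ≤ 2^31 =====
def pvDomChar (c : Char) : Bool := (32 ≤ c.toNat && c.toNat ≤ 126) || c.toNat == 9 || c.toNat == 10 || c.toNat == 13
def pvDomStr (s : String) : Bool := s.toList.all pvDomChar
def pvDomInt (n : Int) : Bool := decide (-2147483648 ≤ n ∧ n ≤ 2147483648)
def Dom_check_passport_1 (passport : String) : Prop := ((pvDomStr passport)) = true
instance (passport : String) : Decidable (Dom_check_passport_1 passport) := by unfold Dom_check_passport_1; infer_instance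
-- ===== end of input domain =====

-- B replaces A's two-stage splitting plus per-required-field membership loop with a single
-- left-to-right character scan that flushes tokens at ':'/' ' and sets a flag per required
-- field (alternative algorithm, same result).

-- ===== PORT A =====
-- s.split(sep) for a nonempty literal sep: split? never returns none there
def pvSplit (s sep : String) : List String := (PySem.Str.split? s sep).getD []

def split_fields (passport : String) : List String :=
  (pvSplit passport ":").foldl
    (fun output word =>
      if PySem.Str.isIn " " word then output ++ pvSplit word " "
      else output ++ [word]) []

-- the 'for field in needed_fields: if field not in fields: is_valid = False; break' loop
def pvNeededLoop (fields : List String) : List String → Bool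
  | [] => true
  | f :: rest => if fields.contains f = false then false else pvNeededLoop fields rest

def check_passport_1 (passport : String) : Bool :=
  pvNeededLoop (split_fields passport) ["byr", "iyr", "eyr", "hgt", "hcl", "ecl", "pid"]

-- ===== PORT B =====
def pvNeeded : List String := ["byr", "iyr", "eyr", "hgt", "hcl", "ecl", "pid"]

-- 'if token in needed_fields: found[needed_fields.index(token)] = True' as one match on
-- needed_fields.index (index? is some exactly when 'token in needed_fields')
def pvMark (found : List Bool) (token : List Char) : List Bool :=
  match PySem.List.index? pvNeeded (String.ofList token) with
  | some i => found.set i true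
  | none => found

-- the 'for ch in passport + ":"' loop; 'ch in ": "' is exactly ch = ':' ∨ ch = ' '
def pvScan (found : List Bool) (token : List Char) : List Char → List Bool
  | [] => found
  | ch :: rest =>
      if ch = ':' ∨ ch = ' ' then pvScan (pvMark found token) [] rest
      else pvScan found (token ++ [ch]) rest

def check_passport_1_alt (passport : String) : Bool :=
  -- (passport + ":").toList = passport.toList ++ [':'] (exact for Python str concat)
  (pvScan (List.replicate 7 false) [] (passport.toList ++ [':'])).all (fun b => b)

-- ===== PRECONDITION & SPEC =====
def Spec_check_passport_1 (passport : String) (out : Bool) : Prop := out = check_passport_1_alt passport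
instance (passport : String) (out : Bool) : Decidable (Spec_check_passport_1 passport out) := by unfold Spec_check_passport_1; infer_instance

-- ===== CLAIM (what is proved, stated in full; the proofs are below) =====
def Claim_equal_check_passport_1 : Prop := ∀ (passport : String), Dom_check_passport_1 passport → Spec_check_passport_1 passport (check_passport_1 passport)

-- ===== LEMMAS AND PROOFS =====

-- structural splitter on a single delimiter character (Python str.split(c), empties kept)
def pvSplitChar (c : Char) : List Char → List (List Char)
  | [] => [[]]
  | x :: xs => if x = c then [] :: pvSplitChar c xs else (pvSplitChar c xs).modifyHead (x :: ·)

-- structural splitter on BOTH delimiters at once: the flat token list of A's split_fields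
def pvTok : List Char → List (List Char)
  | [] => [[]]
  | x :: xs => if x = ':' ∨ x = ' ' then [] :: pvTok xs else (pvTok xs).modifyHead (x :: ·)

theorem pvSplitChar_cons_self (c : Char) (xs : List Char) :
    pvSplitChar c (c :: xs) = [] :: pvSplitChar c xs := by
  rw [pvSplitChar.eq_def]; simp

theorem pvSplitChar_cons_ne (c x : Char) (xs : List Char) (hx : x ≠ c) :
    pvSplitChar c (x :: xs) = (pvSplitChar c xs).modifyHead (x :: ·) := by
  rw [pvSplitChar.eq_def]; simp [hx]

theorem pvTok_cons_delim (x : Char) (xs : List Char) (hx : x = ':' ∨ x = ' ') :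
    pvTok (x :: xs) = [] :: pvTok xs := by
  rw [pvTok.eq_def]
  rcases hx with h | h <;> simp [h]

theorem pvTok_cons_ne (x : Char) (xs : List Char) (hx : ¬ (x = ':' ∨ x = ' ')) :
    pvTok (x :: xs) = (pvTok xs).modifyHead (x :: ·) := by
  rw [pvTok.eq_def]
  simp only [not_or] at hx
  simp [hx.1, hx.2]

theorem pv_modifyHead_nilpre {α : Type} (l : List (List α)) :
    l.modifyHead (fun t => ([] : List α) ++ t) = l := by
  cases l <;> simp [List.modifyHead]

theorem pvSplitChar_ne_nil (c : Char) (l : List Char) : pvSplitChar c l ≠ [] := by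
  induction l with
  | nil => simp [pvSplitChar]
  | cons x xs ih =>
    unfold pvSplitChar
    split_ifs
    · simp
    · cases h : pvSplitChar c xs with
      | nil => exact absurd h ih
      | cons a b => simp [List.modifyHead]

theorem pv_modifyHead_modifyHead {α : Type} (f g : List α → List α) (l : List (List α)) :
    (l.modifyHead g).modifyHead f = l.modifyHead (fun t => f (g t)) := by
  cases l <;> simp [List.modifyHead]

theorem pv_modifyHead_append_left {α : Type} (f : List α → List α) (a b : List (List α))
    (ha : a ≠ []) : (a ++ b).modifyHead f = a.modifyHead f ++ b := by
  cases a with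
  | nil => exact absurd rfl ha
  | cons x xs => simp [List.modifyHead]

-- splitOn.go for a single-character separator computes pvSplitChar
theorem pv_go_single (c : Char) (fuel : Nat) (l cur : List Char) (acc : List (List Char))
    (h : l.length ≤ fuel) :
    PySem.Chars.splitOn.go [c] fuel l cur acc
      = acc.reverse ++ (pvSplitChar c l).modifyHead (cur.reverse ++ ·) := by
  induction fuel generalizing l cur acc with
  | zero =>
    have : l = [] := List.length_eq_zero_iff.mp (Nat.le_zero.mp h)
    subst this
    simp [PySem.Chars.splitOn.go, pvSplitChar, List.modifyHead]
  | succ fuel ih =>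
    cases l with
    | nil => simp [PySem.Chars.splitOn.go, pvSplitChar, List.modifyHead]
    | cons x rest =>
      rw [PySem.Chars.splitOn.go]
      by_cases hx : x = c
      · subst hx
        have hp : List.isPrefixOf [x] (x :: rest) = true := by
          simp
        simp only [hp, if_true, List.length_cons, List.length_nil, List.drop_succ_cons,
          List.drop_zero]
        rw [ih rest [] (cur.reverse :: acc) (by simpa using Nat.le_of_succ_le_succ h)]
        have hid : (pvSplitChar x rest).modifyHead (fun t => [].reverse ++ t)
            = pvSplitChar x rest := by
          cases pvSplitChar x rest <;> simp [List.modifyHead]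
        rw [hid, pvSplitChar_cons_self]
        simp [List.modifyHead]
      · have hp : List.isPrefixOf [c] (x :: rest) = false := by
          rw [← Bool.not_eq_true, List.isPrefixOf_iff_prefix]
          simp [List.cons_prefix_cons]
          intro hc
          exact hx hc.symm
        simp only [hp, Bool.false_eq_true, if_false]
        rw [ih rest (x :: cur) acc (by simpa using Nat.le_of_succ_le_succ h)]
        rw [pvSplitChar_cons_ne c x rest hx, pv_modifyHead_modifyHead]
        have hfun : (fun t => (x :: cur).reverse ++ t) = (fun t => cur.reverse ++ (x :: t)) := by
          funext t; simp
        rw [hfun]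

theorem pv_split_single (s : String) (sep : String) (c : Char) (hsep : sep.toList = [c]) :
    pvSplit s sep = (pvSplitChar c s.toList).map String.ofList := by
  have hchars : PySem.Chars.split? s.toList [c] = some (pvSplitChar c s.toList) := by
    unfold PySem.Chars.split? PySem.Chars.splitOn
    rw [pv_go_single c (s.toList.length + 1) s.toList [] [] (Nat.le_succ _)]
    simp only [List.reverse_nil]
    rw [pv_modifyHead_nilpre]
    simp
  simp [pvSplit, PySem.Str.split?, hsep, hchars]

-- sequential splitting on ':' then ' ' equals one-pass splitting on both
theorem pv_flat (l : List Char) :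
    (pvSplitChar ':' l).flatMap (pvSplitChar ' ') = pvTok l := by
  induction l with
  | nil => simp [pvSplitChar, pvTok]
  | cons x xs ih =>
    by_cases hc : x = ':'
    · subst hc
      rw [pvSplitChar_cons_self, pvTok_cons_delim ':' xs (Or.inl rfl), List.flatMap_cons, ← ih]
      simp [pvSplitChar]
    · obtain ⟨h, t, hht⟩ : ∃ h t, pvSplitChar ':' xs = h :: t := by
        cases hS : pvSplitChar ':' xs with
        | nil => exact absurd hS (pvSplitChar_ne_nil ':' xs)
        | cons h t => exact ⟨h, t, rfl⟩
      have hx : pvSplitChar ':' (x :: xs) = (x :: h) :: t := by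
        rw [pvSplitChar_cons_ne ':' x xs hc, hht]
        simp [List.modifyHead]
      by_cases hs : x = ' '
      · subst hs
        rw [hx, List.flatMap_cons, pvSplitChar_cons_self,
          pvTok_cons_delim ' ' xs (Or.inr rfl), ← ih, hht, List.flatMap_cons]
        simp
      · rw [hx, List.flatMap_cons, pvSplitChar_cons_ne ' ' x h hs,
          pvTok_cons_ne x xs (by tauto), ← ih, hht, List.flatMap_cons,
          ← pv_modifyHead_append_left _ _ _ (pvSplitChar_ne_nil ' ' h)]

-- A's flat field list is the map of pvTok over the characters
theorem pv_fields_eq_tok (s : String) :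
    (pvSplit s ":").flatMap (fun chunk => pvSplit chunk " ")
      = (pvTok s.toList).map String.ofList := by
  rw [pv_split_single s ":" ':' (by decide), List.flatMap_map]
  have : (fun w => pvSplit (String.ofList w) " ") = fun w => (pvSplitChar ' ' w).map String.ofList := by
    funext w
    rw [pv_split_single (String.ofList w) " " ' ' (by decide)]
    simp
  rw [this, ← List.map_flatMap, pv_flat]

-- splitting on a character that does not occur returns the whole list
theorem pvSplitChar_no_occ (c : Char) (l : List Char) (h : c ∉ l) : pvSplitChar c l = [l] := by
  induction l with
  | nil => simp [pvSplitChar]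
  | cons x xs ih =>
    have hx : x ≠ c := fun hc => h (by simp [hc])
    rw [pvSplitChar_cons_ne c x xs hx, ih (fun hm => h (List.mem_cons_of_mem _ hm))]
    simp [List.modifyHead]

-- w.split(" ") = [w] whenever " " does not occur in w
theorem pv_split_no_space (w : String) (h : PySem.Str.isIn " " w = false) :
    pvSplit w " " = [w] := by
  have hninf : ¬ ([' '] <:+: w.toList) := by
    intro hinf
    have ht : PySem.Chars.isIn [' '] w.toList = true :=
      (PySem.Chars.exists_prefix_drop_iff_isIn [' '] w.toList).1
        (by obtain ⟨l₁, l₂, hw⟩ := hinf; exact ⟨l₁.length, by rw [← hw]; simp⟩)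
    have hfalse : PySem.Chars.isIn [' '] w.toList = false := h
    rw [ht] at hfalse
    cases hfalse
  have hnin : ' ' ∉ w.toList := by
    intro hm
    obtain ⟨l₁, l₂, hw⟩ := List.mem_iff_append.mp hm
    exact hninf ⟨l₁, l₂, by simp [hw]⟩
  rw [pv_split_single w " " ' ' (by decide), pvSplitChar_no_occ ' ' w.toList hnin]
  simp

-- A's foldl over chunks builds exactly the flat list of fields
theorem pv_split_fields_eq (passport : String) :
    split_fields passport = (pvSplit passport ":").flatMap (fun chunk => pvSplit chunk " ") := by
  unfold split_fields
  rw [PySem.List.foldl_congr_mem _ _ (fun output word => output ++ pvSplit word " ") _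
    (by
      intro acc w _
      by_cases hw : PySem.Str.isIn " " w = true
      · rw [if_pos hw]
      · rw [if_neg hw]
        show acc ++ [w] = acc ++ pvSplit w " "
        rw [pv_split_no_space w (by simpa using hw)])]
  exact PySem.List.foldl_append_eq_flatMap _ _ _

-- the break-loop over needed fields is the conjunction of memberships
theorem pv_neededLoop_eq_all (fields needed : List String) :
    pvNeededLoop fields needed = needed.all (fun f => fields.contains f) := by
  induction needed with
  | nil => rfl
  | cons f rest ih =>
    cases hf : fields.contains f with
    | true => rw [pvNeededLoop, if_neg (by rw [hf]; decide), ih, List.all_cons, hf, Bool.true_and]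
    | false => rw [pvNeededLoop, if_pos hf, List.all_cons, hf, Bool.false_and]

-- B's scan over l ++ [':'] folds pvMark over the tokens of l (head prefixed by the open token)
theorem pv_scan_eq (l : List Char) (found : List Bool) (cur : List Char) :
    pvScan found cur (l ++ [':'])
      = ((pvTok l).modifyHead (cur ++ ·)).foldl pvMark found := by
  induction l generalizing found cur with
  | nil => simp [pvScan, pvTok, List.modifyHead]
  | cons x xs ih =>
    by_cases hd : x = ':' ∨ x = ' '
    · rw [List.cons_append, pvScan, if_pos hd, ih]
      rw [pvTok_cons_delim x xs hd, pv_modifyHead_nilpre]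
      simp [List.modifyHead, List.foldl_cons]
    · rw [List.cons_append, pvScan, if_neg hd, ih]
      rw [pvTok_cons_ne x xs hd, pv_modifyHead_modifyHead]
      have : (fun t => cur ++ x :: t) = (fun t => (cur ++ [x]) ++ t) := by
        funext t; simp
      rw [this]

theorem pv_mark_length (f : List Bool) (t : List Char) : (pvMark f t).length = f.length := by
  unfold pvMark
  cases PySem.List.index? pvNeeded (String.ofList t) <;> simp

theorem pv_foldl_mark_length (toks : List (List Char)) (f : List Bool) :
    (toks.foldl pvMark f).length = f.length := by
  induction toks generalizing f with
  | nil => rfl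
  | cons t rest ih => rw [List.foldl_cons, ih, pv_mark_length]

theorem pv_mark_getD (f : List Bool) (t : List Char) (i : Nat) (hf : f.length = 7)
    (hi : i < 7) :
    (pvMark f t).getD i false
      = (f.getD i false || (pvNeeded.getD i "" == String.ofList t)) := by
  have hin : i < pvNeeded.length := by simpa using hi
  unfold pvMark
  cases hidx : PySem.List.index? pvNeeded (String.ofList t) with
  | none =>
    have hnm : String.ofList t ∉ pvNeeded := List.idxOf?_eq_none_iff.mp hidx
    have hne : pvNeeded.getD i "" ≠ String.ofList t := by
      rw [List.getD_eq_getElem _ _ hin]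
      intro hc
      exact hnm (hc ▸ List.getElem_mem hin)
    have hb : (pvNeeded.getD i "" == String.ofList t) = false := beq_eq_false_iff_ne.mpr hne
    rw [hb, Bool.or_false]
  | some j =>
    obtain ⟨hj, hgj, -⟩ := PySem.List.getElem_of_index?_eq_some hidx
    have hnodup : pvNeeded.Nodup := by decide
    have hjf : j < f.length := by rw [hf]; simpa using hj
    rw [List.getD_eq_getElem _ _ (by rw [List.length_set, hf]; exact hi : i < (f.set j true).length),
      List.getElem_set, List.getD_eq_getElem _ _ (by omega : i < f.length),
      List.getD_eq_getElem _ _ hin]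
    by_cases hji : j = i
    · subst hji
      simp [← hgj]
    · rw [if_neg hji]
      have hne : pvNeeded[i]'hin ≠ String.ofList t := by
        intro hc
        have : pvNeeded[i]'hin = pvNeeded[j]'hj := by rw [hc, hgj]
        exact hji (((List.Nodup.getElem_inj_iff hnodup).mp this).symm)
      simp [hne]

theorem pv_foldl_mark_getD (toks : List (List Char)) (f : List Bool) (i : Nat)
    (hf : f.length = 7) (hi : i < 7) :
    (toks.foldl pvMark f).getD i false
      = (f.getD i false || (toks.map String.ofList).contains (pvNeeded.getD i "")) := by
  induction toks generalizing f with
  | nil => simp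
  | cons t rest ih =>
    rw [List.foldl_cons, ih (pvMark f t) (by rw [pv_mark_length f t]; exact hf),
      pv_mark_getD f t i hf hi, List.map_cons, List.contains_cons]
    cases f.getD i false <;> cases (pvNeeded.getD i "" == String.ofList t) <;> simp

-- both sides say: every needed field occurs among the tokens
theorem pv_alt_eq (passport : String) :
    check_passport_1_alt passport
      = pvNeeded.all (fun f => ((pvTok passport.toList).map String.ofList).contains f) := by
  unfold check_passport_1_alt
  rw [pv_scan_eq, pv_modifyHead_nilpre]
  have hflags : (pvTok passport.toList).foldl pvMark (List.replicate 7 false)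
      = pvNeeded.map (fun f => ((pvTok passport.toList).map String.ofList).contains f) := by
    apply List.ext_getElem
    · rw [pv_foldl_mark_length]; simp [pvNeeded]
    · intro i h1 h2
      have hi7 : i < 7 := by
        have := h1; rwa [pv_foldl_mark_length, List.length_replicate] at this
      have hin : i < pvNeeded.length := by simpa using hi7
      rw [← List.getD_eq_getElem _ false h1,
        pv_foldl_mark_getD _ _ i (by simp) hi7, List.getElem_map,
        List.getD_eq_getElem _ _ (by simpa using hi7 : i < (List.replicate 7 false).length),
        List.getElem_replicate, List.getD_eq_getElem _ _ hin]
      simp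
  rw [hflags, List.all_map]
  rfl

-- ===== VERDICT (by name: the statement is the Claim_ definition above) =====
theorem check_passport_1_spec : Claim_equal_check_passport_1 := by
  intro passport _
  unfold Spec_check_passport_1 check_passport_1
  rw [pv_split_fields_eq, pv_fields_eq_tok, pv_neededLoop_eq_all, pv_alt_eq]
  rfl
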